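-- pv_equiv track=rewrite | github.com/Aya-Lithy/MRI_digital_simulator | task3Final.py | RectangularGraph
-- ===== SOURCE A (Python) =====
-- def RectangularGraph(tR,shiftDown,shiftRight,step,width):
--     z = []
--
--     for i in range (0,tR):
--         if i < int(shiftRight):
--             z.append(shiftDown)
--         elif i >= int(shiftRight) and i < int(width+shiftRight):
--             z.append(shiftDown+(step*1))
--         else:
--             z.append(shiftDown)
--     return z
-- ===== SOURCE B (Python) =====
-- def RectangularGraph(tR, shiftDown, shiftRight, step, width):
--     z = [shiftDown] * tR
--     lo = max(0, int(shiftRight))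
--     hi = min(tR, int(width + shiftRight))
--     if lo < hi:
--         z[lo:hi] = [shiftDown + step] * (hi - lo)
--     return z
-- ===== Notes on version B (the rewrite author's own statement) =====
-- stated objective: simpler
-- what changed: Replaces the per-index if/elif/else loop with a uniform baseline list plus one clamped slice assignment of the raised block.
import Mathlib
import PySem

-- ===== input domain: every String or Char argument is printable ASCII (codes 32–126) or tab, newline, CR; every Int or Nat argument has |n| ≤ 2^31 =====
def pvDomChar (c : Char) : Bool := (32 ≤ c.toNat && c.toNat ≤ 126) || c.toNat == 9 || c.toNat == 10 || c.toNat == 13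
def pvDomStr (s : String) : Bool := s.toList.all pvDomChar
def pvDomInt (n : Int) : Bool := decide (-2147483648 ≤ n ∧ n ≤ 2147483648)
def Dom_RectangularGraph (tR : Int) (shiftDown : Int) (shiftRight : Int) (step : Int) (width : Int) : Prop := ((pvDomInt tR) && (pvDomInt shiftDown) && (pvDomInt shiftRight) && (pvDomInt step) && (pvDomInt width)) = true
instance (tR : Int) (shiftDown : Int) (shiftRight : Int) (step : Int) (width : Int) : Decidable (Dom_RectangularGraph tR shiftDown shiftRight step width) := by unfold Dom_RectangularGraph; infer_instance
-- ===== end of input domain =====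

-- B builds the output as a baseline list with one clamped slice overwritten (simpler), instead of A's per-index if/elif/else loop.

-- ===== PORT A =====
def RectangularGraph (tR : Int) (shiftDown : Int) (shiftRight : Int) (step : Int) (width : Int) : List Int :=
  (PySem.List.pyRange 0 tR 1).foldl
    (fun z i =>
      if i < shiftRight then z ++ [shiftDown]
      else if shiftRight ≤ i ∧ i < width + shiftRight then z ++ [shiftDown + step * 1]
      else z ++ [shiftDown])
    []

-- ===== PORT B =====
def RectangularGraph_alt (tR : Int) (shiftDown : Int) (shiftRight : Int) (step : Int) (width : Int) : List Int :=
  let z := List.replicate tR.toNat shiftDown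
  let lo := max 0 shiftRight
  let hi := min tR (width + shiftRight)
  if lo < hi then
    z.take lo.toNat ++ List.replicate (hi - lo).toNat (shiftDown + step) ++ z.drop hi.toNat
  else z

-- ===== PRECONDITION & SPEC =====
def Spec_RectangularGraph (tR : Int) (shiftDown : Int) (shiftRight : Int) (step : Int) (width : Int) (out : List Int) : Prop := out = RectangularGraph_alt tR shiftDown shiftRight step width
instance (tR : Int) (shiftDown : Int) (shiftRight : Int) (step : Int) (width : Int) (out : List Int) : Decidable (Spec_RectangularGraph tR shiftDown shiftRight step width out) := by unfold Spec_RectangularGraph; infer_instance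

-- ===== CLAIM (what is proved, stated in full; the proofs are below) =====
def Claim_equal_RectangularGraph : Prop := ∀ (tR : Int) (shiftDown : Int) (shiftRight : Int) (step : Int) (width : Int), Dom_RectangularGraph tR shiftDown shiftRight step width → Spec_RectangularGraph tR shiftDown shiftRight step width (RectangularGraph tR shiftDown shiftRight step width)

-- ===== LEMMAS AND PROOFS =====

-- A's loop is a map of the pointwise branch over the index range.
theorem RectangularGraph_eq_map (tR shiftDown shiftRight step width : Int) :
    RectangularGraph tR shiftDown shiftRight step width =
      (PySem.List.pyRange 0 tR 1).map (fun i =>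
        if i < shiftRight then shiftDown
        else if shiftRight ≤ i ∧ i < width + shiftRight then shiftDown + step * 1
        else shiftDown) := by
  unfold RectangularGraph
  have h := PySem.List.foldl_append_singleton_eq_map
    (f := fun i =>
      if i < shiftRight then shiftDown
      else if shiftRight ≤ i ∧ i < width + shiftRight then shiftDown + step * 1
      else shiftDown)
    (l := PySem.List.pyRange 0 tR 1) (acc := [])
  have hfun : (fun (z : List Int) (i : Int) =>
      if i < shiftRight then z ++ [shiftDown]
      else if shiftRight ≤ i ∧ i < width + shiftRight then z ++ [shiftDown + step * 1]
      else z ++ [shiftDown]) =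
      (fun (acc : List Int) (x : Int) =>
        acc ++ [if x < shiftRight then shiftDown
          else if shiftRight ≤ x ∧ x < width + shiftRight then shiftDown + step * 1
          else shiftDown]) := by
    funext z i; split_ifs <;> rfl
  rw [hfun, h]; rfl

-- map of a pointwise-constant function over a range is a replicate
theorem map_const_of_mem {f : Int → Int} {a b v : Int}
    (h : ∀ i, a ≤ i → i < b → f i = v) :
    (PySem.List.pyRange a b 1).map f = List.replicate (b - a).toNat v := by
  have h1 : (PySem.List.pyRange a b 1).map f = (PySem.List.pyRange a b 1).map (fun _ => v) := by
    apply List.map_congr_left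
    intro i hi
    rw [PySem.List.mem_pyRange_one] at hi
    exact h i hi.1 hi.2
  rw [h1, List.map_const', PySem.List.length_pyRange_one]

theorem RectangularGraph_spec' (tR shiftDown shiftRight step width : Int) :
    RectangularGraph tR shiftDown shiftRight step width =
      RectangularGraph_alt tR shiftDown shiftRight step width := by
  rw [RectangularGraph_eq_map]
  unfold RectangularGraph_alt
  set f : Int → Int := fun i =>
    if i < shiftRight then shiftDown
    else if shiftRight ≤ i ∧ i < width + shiftRight then shiftDown + step * 1
    else shiftDown with hf
  simp only []
  set lo := max 0 shiftRight with hlo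
  set hi := min tR (width + shiftRight) with hhi
  by_cases hcase : lo < hi
  · -- split the range [0,tR) at lo and hi
    simp only [if_pos hcase]
    have h0lo : (0:Int) ≤ lo := le_max_left _ _
    have hhitR : hi ≤ tR := min_le_left _ _
    have hlohi : lo ≤ hi := le_of_lt hcase
    have hlotR : lo ≤ tR := le_trans hlohi hhitR
    rw [PySem.List.pyRange_one_append 0 lo tR h0lo hlotR,
        PySem.List.pyRange_one_append lo hi tR hlohi hhitR,
        List.map_append, List.map_append]
    have hseg1 : (PySem.List.pyRange 0 lo 1).map f = List.replicate (lo - 0).toNat shiftDown := by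
      apply map_const_of_mem
      intro i hi0 hilo
      have : i < shiftRight := by omega
      simp [hf, this]
    have hseg2 : (PySem.List.pyRange lo hi 1).map f =
        List.replicate (hi - lo).toNat (shiftDown + step * 1) := by
      apply map_const_of_mem
      intro i hil hih
      have h1 : ¬ i < shiftRight := by omega
      have h2 : shiftRight ≤ i ∧ i < width + shiftRight := by omega
      simp [hf, h1, h2]
    have hseg3 : (PySem.List.pyRange hi tR 1).map f = List.replicate (tR - hi).toNat shiftDown := by
      apply map_const_of_mem
      intro i hih hit
      have h1 : ¬ i < shiftRight := by omega
      have h2 : ¬ (shiftRight ≤ i ∧ i < width + shiftRight) := by omega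
      simp [hf, h1, h2]
    rw [hseg1, hseg2, hseg3, List.take_replicate, List.drop_replicate]
    have e1 : min lo.toNat tR.toNat = (lo - 0).toNat := by omega
    have e2 : tR.toNat - hi.toNat = (tR - hi).toNat := by omega
    rw [e1, e2, mul_one, List.append_assoc]
  · -- no raised segment: everything is the baseline value
    simp only [if_neg hcase]
    have : (PySem.List.pyRange 0 tR 1).map f = List.replicate (tR - 0).toNat shiftDown := by
      apply map_const_of_mem
      intro i hi0 hit
      by_cases h1 : i < shiftRight
      · simp [hf, h1]
      · have h2 : ¬ (shiftRight ≤ i ∧ i < width + shiftRight) := by omega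
        simp [hf, h1, h2]
    rw [this]
    congr 1; omega

-- ===== VERDICT (by name: the statement is the Claim_ definition above) =====
theorem RectangularGraph_spec : Claim_equal_RectangularGraph := by
  intro tR shiftDown shiftRight step width _
  exact RectangularGraph_spec' tR shiftDown shiftRight step width
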